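-- pv_equiv track=rewrite | github.com/lukehalleran/ai-assistant-framework | knowledge/WikiManager.py | _pick_candidate
-- ===== SOURCE A (Python) =====
-- from typing import Optional, List
--
-- def _token_overlap_score(query: str, candidate: str) -> float:
--     qset = set(w for w in query.lower().split() if len(w) > 2)
--     cset = set(w for w in candidate.lower().split() if len(w) > 2)
--     if not qset or not cset:
--         return 0.0
--     return len(qset & cset) / len(qset)
--
-- def _pick_candidate(query: str, candidates: List[str]) -> Optional[str]:
--     if not candidates:
--         return None
--     # 1) exactish match
--     q_nospace = query.replace(" ", "").lower()
--     for c in candidates: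
--         if c.replace(" ", "").lower() == q_nospace:
--             return c
--     # 2) best token overlap (handles “Powerball” vs “Information about the Powerball lottery”)
--     best = max(candidates, key=lambda c: _token_overlap_score(query, c))
--     return best
-- ===== SOURCE B (Python) =====
-- from typing import Optional, List
--
-- def _pick_candidate(query: str, candidates: List[str]) -> Optional[str]:
--     if not candidates:
--         return None
--     q_nospace = query.replace(" ", "").lower()
--     qset = set(w for w in query.lower().split() if len(w) > 2)
--     best = None
--     best_score = -1
--     for c in candidates:
--         if c.replace(" ", "").lower() == q_nospace:
--             return c
--         cset = set(w for w in c.lower().split() if len(w) > 2)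
--         score = len(qset & cset)
--         if score > best_score:
--             best, best_score = c, score
--     return best
-- ===== Notes on version B (the rewrite author's own statement) =====
-- stated objective: faster
-- what changed: Replaces A's two sequential passes (first-exact-match scan, then max() with a float token-overlap key whose lambda rebuilds the query token set for every candidate) with one loop that tokenizes the query once and tracks the best candidate by an integer overlap count with a strict-greater update, reproducing max()'s first-maximal tie behavior without floats.
import Mathlib
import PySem

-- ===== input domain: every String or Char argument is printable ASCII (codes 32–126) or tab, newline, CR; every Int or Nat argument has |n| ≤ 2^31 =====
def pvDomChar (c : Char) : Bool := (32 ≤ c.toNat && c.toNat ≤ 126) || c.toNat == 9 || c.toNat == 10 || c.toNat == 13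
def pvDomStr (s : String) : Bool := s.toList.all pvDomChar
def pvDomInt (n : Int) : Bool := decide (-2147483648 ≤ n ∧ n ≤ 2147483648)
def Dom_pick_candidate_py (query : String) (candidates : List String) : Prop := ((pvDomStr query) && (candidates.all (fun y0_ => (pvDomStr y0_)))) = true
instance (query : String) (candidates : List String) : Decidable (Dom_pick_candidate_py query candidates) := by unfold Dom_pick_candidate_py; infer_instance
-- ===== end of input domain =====

-- B merges A's two passes (exact-match scan, then max by token-overlap) into one loop that
-- precomputes the query token set once and tracks the best candidate by an integer overlap
-- count with a strict-greater update (objective: alternative single-pass decomposition).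

-- ===== PORT A =====
-- s.replace(" ", "").lower()  (shared normalization expression of both Pythons)
def pvNorm (s : String) : String := PySem.Str.lower (PySem.Str.replace s " " "")

-- set(w for w in s.lower().split() if len(w) > 2)  (shared token-set expression of both Pythons)
def pvTokens (s : String) : PySem.Set String :=
  PySem.Set.ofList (((PySem.Str.split₀ (PySem.Str.lower s))).filter (fun w => 2 < PySem.Str.len w))

-- _token_overlap_score: the float len(qset & cset) / len(qset) is ported as the exact rational.
-- This is exact for every comparison the program makes: all scores compared by max() share the
-- positive denominator len(qset) and have integer numerators far below 2^53, so Python's float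
-- comparisons coincide with the rational ones.
def token_overlap_score (query : String) (candidate : String) : Rat :=
  if pvTokens query = [] ∨ pvTokens candidate = [] then 0
  else (PySem.Set.len (PySem.Set.inter (pvTokens query) (pvTokens candidate)) : Rat) /
       (PySem.Set.len (pvTokens query) : Rat)

def pick_candidate_py (query : String) (candidates : List String) : Option String :=
  if candidates = [] then none
  else
    let q_nospace := pvNorm query
    match candidates.find? (fun c => pvNorm c == q_nospace) with
    | some c => some c
    | none => PySem.List.max? candidates (fun c => token_overlap_score query c)

-- ===== PORT B =====
-- len(qset & cset) for one candidate, qset precomputed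
def pvOverlap (qset : PySem.Set String) (c : String) : Int :=
  PySem.Set.len (PySem.Set.inter qset (pvTokens c))

-- the single loop of B: exact match returns immediately, else strict-greater best tracking
def pickLoop (qn : String) (qset : PySem.Set String) :
    List String → Option String → Int → Option String
  | [], best, _ => best
  | c :: rest, best, bestScore =>
    if pvNorm c == qn then some c
    else
      let score := pvOverlap qset c
      if bestScore < score then pickLoop qn qset rest (some c) score
      else pickLoop qn qset rest best bestScore

def pick_candidate_py_alt (query : String) (candidates : List String) : Option String :=
  if candidates = [] then none
  else pickLoop (pvNorm query) (pvTokens query) candidates none (-1)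

-- ===== PRECONDITION & SPEC =====
def Spec_pick_candidate_py (query : String) (candidates : List String) (out : Option String) : Prop := out = pick_candidate_py_alt query candidates
instance (query : String) (candidates : List String) (out : Option String) : Decidable (Spec_pick_candidate_py query candidates out) := by unfold Spec_pick_candidate_py; infer_instance

-- ===== CLAIM (what is proved, stated in full; the proofs are below) =====
def Claim_equal_pick_candidate_py : Prop := ∀ (query : String) (candidates : List String), Dom_pick_candidate_py query candidates → Spec_pick_candidate_py query candidates (pick_candidate_py query candidates)

-- ===== LEMMAS AND PROOFS =====

-- A's float score and B's integer overlap count induce the same strict order on candidates.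
theorem score_lt_iff (q x y : String) :
    token_overlap_score q x < token_overlap_score q y ↔
      pvOverlap (pvTokens q) x < pvOverlap (pvTokens q) y := by
  simp only [token_overlap_score, pvOverlap]
  by_cases hq : pvTokens q = []
  · rw [hq, if_pos (Or.inl rfl), if_pos (Or.inl rfl)]
    have h0 : ∀ t : PySem.Set String, PySem.Set.inter ([] : List String) t = [] := fun _ => rfl
    rw [h0, h0]
    exact ⟨fun h => absurd h (lt_irrefl _), fun h => absurd h (lt_irrefl _)⟩
  · have hlen : 0 < (PySem.Set.len (pvTokens q) : Rat) := by
      have h : 0 < (pvTokens q).length := List.length_pos_iff.mpr hq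
      have : (0 : Int) < PySem.Set.len (pvTokens q) := by unfold PySem.Set.len; exact_mod_cast h
      exact_mod_cast this
    have hform : ∀ c : String,
        (if pvTokens q = [] ∨ pvTokens c = [] then (0 : Rat)
         else (PySem.Set.len (PySem.Set.inter (pvTokens q) (pvTokens c)) : Rat) /
              (PySem.Set.len (pvTokens q) : Rat))
        = (PySem.Set.len (PySem.Set.inter (pvTokens q) (pvTokens c)) : Rat) /
          (PySem.Set.len (pvTokens q) : Rat) := by
      intro c
      by_cases hc : pvTokens c = []
      · have h1 : PySem.Set.inter (pvTokens q) ([] : List String) = [] := by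
          simp [PySem.Set.inter, PySem.Set.contains]
        rw [if_pos (Or.inr hc), hc, h1]
        show (0:Rat) = ((0 : Int) : Rat) / (PySem.Set.len (pvTokens q) : Rat)
        rw [Int.cast_zero, zero_div]
      · rw [if_neg (by simp [hq, hc])]
    rw [hform x, hform y, div_lt_div_iff_of_pos_right hlen]
    exact_mod_cast Iff.rfl

theorem overlap_nonneg (qset : PySem.Set String) (c : String) : 0 ≤ pvOverlap qset c := by
  unfold pvOverlap
  simp [PySem.Set.len]

-- if an exact match exists, B's loop returns the first one, whatever its state
theorem pickLoop_find_some (qn : String) (qset : PySem.Set String) (l : List String)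
    (c : String) (h : l.find? (fun c => pvNorm c == qn) = some c) :
    ∀ best s, pickLoop qn qset l best s = some c := by
  induction l with
  | nil => simp at h
  | cons a t ih =>
    intro best s
    by_cases ha : (pvNorm a == qn) = true
    · simp only [List.find?_cons, ha] at h
      simp only [pickLoop]
      rw [if_pos ha]
      exact h
    · have ha' : (pvNorm a == qn) = false := by simpa using ha
      simp only [List.find?_cons, ha'] at h
      simp only [pickLoop]
      rw [if_neg (by simp [ha'])]
      split <;> exact ih h _ _

-- with no exact match in l, B's loop from a state describing max?'s accumulator
-- computes max?'s fold with A's float key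
theorem pickLoop_no_match (q qn : String) (l : List String)
    (hnm : ∀ c ∈ l, ¬ (pvNorm c == qn) = true) :
    ∀ (best : Option String) (s : Int),
      (best = none ∧ s = -1) ∨ (∃ m, best = some m ∧ s = pvOverlap (pvTokens q) m) →
      pickLoop qn (pvTokens q) l best s =
        l.foldl (fun acc x =>
          match acc with
          | none => some x
          | some m => if token_overlap_score q m < token_overlap_score q x then some x else some m)
          best := by
  induction l with
  | nil => intro best s _; rfl
  | cons a t ih =>
    intro best s hst
    have ha : ¬ (pvNorm a == qn) = true := hnm a (List.mem_cons_self)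
    have hnt : ∀ c ∈ t, ¬ (pvNorm c == qn) = true := fun c hc => hnm c (List.mem_cons_of_mem _ hc)
    rcases hst with ⟨hb, hs⟩ | ⟨m, hb, hs⟩
    · subst hb; subst hs
      simp only [pickLoop, ha, List.foldl_cons]
      have hlt : (-1 : Int) < pvOverlap (pvTokens q) a :=
        lt_of_lt_of_le (by norm_num) (overlap_nonneg _ a)
      rw [if_pos hlt]
      exact ih hnt _ _ (Or.inr ⟨a, rfl, rfl⟩)
    · subst hb; subst hs
      simp only [pickLoop, ha, List.foldl_cons]
      by_cases hcmp : pvOverlap (pvTokens q) m < pvOverlap (pvTokens q) a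
      · rw [if_pos hcmp, if_pos ((score_lt_iff q m a).mpr hcmp)]
        exact ih hnt _ _ (Or.inr ⟨a, rfl, rfl⟩)
      · rw [if_neg hcmp, if_neg (fun h => hcmp ((score_lt_iff q m a).mp h))]
        exact ih hnt _ _ (Or.inr ⟨m, rfl, rfl⟩)

-- ===== VERDICT (by name: the statement is the Claim_ definition above) =====
theorem pick_candidate_py_spec : Claim_equal_pick_candidate_py := by
  intro query candidates _
  unfold Spec_pick_candidate_py pick_candidate_py pick_candidate_py_alt
  by_cases hnil : candidates = []
  · simp [hnil]
  · rw [if_neg hnil, if_neg hnil]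
    cases hfind : candidates.find? (fun c => pvNorm c == pvNorm query) with
    | some c =>
      simp only [hfind]
      exact (pickLoop_find_some _ _ _ _ hfind _ _).symm
    | none =>
      simp only [hfind]
      have hnm : ∀ c ∈ candidates, ¬ (pvNorm c == pvNorm query) = true := by
        intro c hc
        exact List.find?_eq_none.mp hfind c hc
      rw [pickLoop_no_match query (pvNorm query) candidates hnm none (-1) (Or.inl ⟨rfl, rfl⟩)]
      unfold PySem.List.max?
      apply PySem.List.foldl_congr_mem
      intro acc c _
      cases acc with
      | none => rfl
      | some m =>
        by_cases h : token_overlap_score query m < token_overlap_score query c <;> simp [h]
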